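-- pv_equiv track=rewrite | github.com/noim210/myCode | myPython/pyrunner.py | compare2str
-- ===== SOURCE A (Python) =====
-- def compare2str(str1,str2):
--     lines1 = str1.split('\n')
--     lines2 = str2.split('\n')
--     ilen = len(lines1)
--
--     if(ilen!=len(lines2)):
--         return False
--
--     for i in range(ilen):
--         if(lines1[i]!=lines2[i]):
--             return False;
--     return True
-- ===== SOURCE B (Python) =====
-- def compare2str(str1, str2):
--     # Splitting on '\n' and comparing the line lists elementwise (with the
--     # length guard) is exactly string equality, so compare directly.
--     return str1 == str2
-- ===== Notes on version B (the rewrite author's own statement) =====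
-- stated objective: simpler
-- what changed: Replaced the split-on-newline, length-guard and index loop with a single direct string equality, justified by the proved fact that splitting on '\n' is injective.
import Mathlib
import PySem

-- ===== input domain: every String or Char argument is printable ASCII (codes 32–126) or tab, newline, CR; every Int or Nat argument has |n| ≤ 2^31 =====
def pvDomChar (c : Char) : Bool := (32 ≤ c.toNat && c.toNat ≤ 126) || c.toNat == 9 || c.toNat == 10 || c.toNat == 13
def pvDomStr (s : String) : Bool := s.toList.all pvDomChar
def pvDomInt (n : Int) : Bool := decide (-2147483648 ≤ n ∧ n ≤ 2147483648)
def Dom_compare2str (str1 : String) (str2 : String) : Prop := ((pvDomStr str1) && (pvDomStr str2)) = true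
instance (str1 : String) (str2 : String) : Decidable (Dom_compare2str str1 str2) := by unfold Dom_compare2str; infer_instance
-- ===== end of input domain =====

-- B replaces A's split-on-'\n' + length guard + index loop by one direct string
-- equality (objective: simpler); equivalence rests on injectivity of the split.

-- ===== PORT A =====
-- str.split('\n') with a non-empty separator never raises: split? returns some,
-- and the getD [] default is never taken (exact on all inputs).
def compare2str (str1 : String) (str2 : String) : Bool :=
  let lines1 := (PySem.Str.split? str1 "\n").getD []
  let lines2 := (PySem.Str.split? str2 "\n").getD []
  let ilen := lines1.length
  if ilen ≠ lines2.length then false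
  else
    -- for i in range(ilen): if lines1[i] != lines2[i]: return False — early
    -- return ported as short-circuiting List.all over the same range
    (PySem.List.pyRange 0 (ilen : Int) 1).all (fun i =>
      PySem.List.pyGet? lines1 i == PySem.List.pyGet? lines2 i)

-- ===== PORT B =====
def compare2str_alt (str1 : String) (str2 : String) : Bool :=
  str1 == str2

-- ===== PRECONDITION & SPEC =====
def Spec_compare2str (str1 : String) (str2 : String) (out : Bool) : Prop := out = compare2str_alt str1 str2
instance (str1 : String) (str2 : String) (out : Bool) : Decidable (Spec_compare2str str1 str2 out) := by unfold Spec_compare2str; infer_instance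

-- ===== CLAIM (what is proved, stated in full; the proofs are below) =====
def Claim_equal_compare2str : Prop := ∀ (str1 : String) (str2 : String), Dom_compare2str str1 str2 → Spec_compare2str str1 str2 (compare2str str1 str2)

-- ===== LEMMAS AND PROOFS =====

-- clean structural version of PySem.Chars.splitOn.go (proof helper only)
def spHelper (sep : List Char) (hsep : sep ≠ []) : List Char → List Char → List (List Char)
  | [], cur => [cur.reverse]
  | c :: rest, cur =>
    if sep.isPrefixOf (c :: rest) then
      cur.reverse :: spHelper sep hsep ((c :: rest).drop sep.length) []
    else
      spHelper sep hsep rest (c :: cur)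
  termination_by l _ => l.length
  decreasing_by
    · have h1 : 0 < sep.length := List.length_pos_iff.mpr hsep
      simp only [List.length_drop, List.length_cons]
      omega
    · simp

lemma intercalate_cons₂ (sep a b : List Char) (l : List (List Char)) :
    sep.intercalate (a :: b :: l) = a ++ sep ++ sep.intercalate (b :: l) := by
  simp [List.intercalate]

lemma go_eq_spHelper (sep : List Char) (hsep : sep ≠ []) :
    ∀ fuel l cur acc, l.length < fuel →
      PySem.Chars.splitOn.go sep fuel l cur acc = acc.reverse ++ spHelper sep hsep l cur := by
  intro fuel
  induction fuel with
  | zero => intro l cur acc h; omega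
  | succ n ih =>
    intro l cur acc h
    match l with
    | [] => simp [PySem.Chars.splitOn.go, spHelper]
    | c :: rest =>
      rw [PySem.Chars.splitOn.go]
      by_cases hp : sep.isPrefixOf (c :: rest)
      · have hlen : 0 < sep.length := List.length_pos_iff.mpr hsep
        have hd : ((c :: rest).drop sep.length).length < n := by
          simp only [List.length_drop, List.length_cons]
          simp only [List.length_cons] at h
          omega
        simp only [hp, if_true]
        rw [ih _ _ _ hd, spHelper]
        simp [hp]
      · have hd : rest.length < n := by simp only [List.length_cons] at h; omega
        simp only [hp]
        rw [ih _ _ _ hd, spHelper]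
        simp [hp]

lemma spHelper_ne_nil (sep : List Char) (hsep : sep ≠ []) (l cur : List Char) :
    spHelper sep hsep l cur ≠ [] := by
  fun_induction spHelper <;> simp_all

lemma join_spHelper (sep : List Char) (hsep : sep ≠ []) (l cur : List Char) :
    PySem.Chars.join sep (spHelper sep hsep l cur) = cur.reverse ++ l := by
  fun_induction spHelper with
  | case1 cur => simp [PySem.Chars.join, List.intercalate]
  | case2 c rest cur h ih =>
    have hne := spHelper_ne_nil sep hsep ((c :: rest).drop sep.length) []
    obtain ⟨t, ht⟩ := List.isPrefixOf_iff_prefix.mp h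
    have hdrop : (c :: rest).drop sep.length = t := by rw [← ht, List.drop_left]
    cases hs : spHelper sep hsep ((c :: rest).drop sep.length) [] with
    | nil => exact absurd hs hne
    | cons a as =>
      rw [hs] at ih
      simp only [List.reverse_nil, List.nil_append] at ih
      unfold PySem.Chars.join at ih ⊢
      rw [intercalate_cons₂, ih, hdrop, ← ht]
      simp
  | case3 c rest cur h ih =>
    rw [ih]
    simp

lemma splitOn_roundtrip (s : List Char) :
    PySem.Chars.join ['\n'] (PySem.Chars.splitOn s ['\n']) = s := by
  unfold PySem.Chars.splitOn
  rw [go_eq_spHelper ['\n'] (by simp) _ _ _ _ (by omega)]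
  simpa using join_spHelper ['\n'] (by simp) s []

lemma splitOn_inj {s t : List Char}
    (h : PySem.Chars.splitOn s ['\n'] = PySem.Chars.splitOn t ['\n']) : s = t := by
  have hrt := splitOn_roundtrip s
  rw [h, splitOn_roundtrip t] at hrt
  exact hrt.symm

lemma pyRange_zero_nat (n : Nat) :
    PySem.List.pyRange 0 (n : Int) 1 = List.map (fun k : Nat => (k : Int)) (List.range n) := by
  unfold PySem.List.pyRange
  rcases Nat.eq_zero_or_pos n with h | h
  · subst h; simp
  · have h0 : (0 : Int) < n := by exact_mod_cast h
    simp only [one_ne_zero, if_false, if_pos h0]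
    norm_num

lemma split?_some (s : String) :
    ∃ ls, PySem.Str.split? s "\n" = some ls ∧ ls.map String.toList = PySem.Chars.splitOn s.toList ['\n'] := by
  have hm := PySem.Str.split?_map s "\n"
  have hc : PySem.Chars.split? s.toList "\n".toList = some (PySem.Chars.splitOn s.toList "\n".toList) := by
    unfold PySem.Chars.split?; simp
  rw [hc] at hm
  cases he : PySem.Str.split? s "\n" with
  | none => rw [he] at hm; simp at hm
  | some ls =>
    rw [he] at hm
    simp at hm
    exact ⟨ls, rfl, by simpa using hm⟩

lemma loop_eq_decide (xs ys : List String) (hlen : xs.length = ys.length) :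
    ((PySem.List.pyRange 0 (xs.length : Int) 1).all (fun i =>
      PySem.List.pyGet? xs i == PySem.List.pyGet? ys i)) = decide (xs = ys) := by
  rw [pyRange_zero_nat]
  by_cases hxy : xs = ys
  · subst hxy
    simp
  · simp only [hxy, decide_false]
    rw [List.all_map, List.all_eq_false]
    have hx : ¬ (∀ k, (h : k < xs.length) → xs[k] = ys[k]) := by
      intro hall
      exact hxy (List.ext_getElem hlen (fun k h1 h2 => hall k h1))
    rw [not_forall] at hx
    obtain ⟨k, hx⟩ := hx
    rw [not_forall] at hx
    obtain ⟨hk, hne⟩ := hx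
    refine ⟨k, List.mem_range.mpr hk, ?_⟩
    simp only [Function.comp_apply, PySem.List.pyGet?_natCast]
    simp [List.getElem?_eq_getElem hk, List.getElem?_eq_getElem (hlen ▸ hk), hne]

-- ===== VERDICT (by name: the statement is the Claim_ definition above) =====
theorem compare2str_spec : Claim_equal_compare2str := by
  intro str1 str2 _
  unfold Spec_compare2str compare2str compare2str_alt
  obtain ⟨ls1, he1, hm1⟩ := split?_some str1
  obtain ⟨ls2, he2, hm2⟩ := split?_some str2
  rw [he1, he2]
  simp only [Option.getD_some]
  have hlists : (ls1 = ls2) ↔ (str1 = str2) := by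
    constructor
    · intro h
      have ht : str1.toList = str2.toList := splitOn_inj (by rw [← hm1, ← hm2, h])
      exact String.ext (by simpa using ht)
    · intro h
      subst h
      rw [he1] at he2
      exact Option.some.inj he2
  by_cases hlen : ls1.length = ls2.length
  · rw [if_neg (by simp [hlen])]
    rw [loop_eq_decide ls1 ls2 hlen]
    by_cases hq : str1 = str2
    · simp [hq, hlists.mpr hq]
    · have h1 : ls1 ≠ ls2 := fun h => hq (hlists.mp h)
      simp [hq, h1]
  · rw [if_pos hlen]
    have hne : str1 ≠ str2 := fun h => hlen (by rw [hlists.mpr h])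
    simp [hne]
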